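-- pv_equiv track=rewrite | github.com/tgerez/Advent-of-code | 2015/day_05/day_05_part_2.py | check_pairs_of_twice_letters
-- ===== SOURCE A (Python) =====
-- def check_pairs_of_twice_letters(l): # l est une liste de chaines
--     result = []
--     for s in l: # for each string in list
--         ok = False
--         for i in range(len(s)-1):
--             doublet = s[i:i+2]
--             for j in range(i+2, len(s)-1):
--                 if doublet == s[j:j+2]:
--                     ok = True
--         if ok:
--             result.append(s)
--     return result
-- ===== SOURCE B (Python) =====
-- def check_pairs_of_twice_letters(l):
--     result = []
--     for s in l:
--         first = {}
--         for i in range(len(s) - 1):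
--             p = s[i:i+2]
--             if p in first:
--                 if first[p] <= i - 2:
--                     result.append(s)
--                     break
--             else:
--                 first[p] = i
--     return result
-- ===== Notes on version B (the rewrite author's own statement) =====
-- stated objective: faster
-- what changed: replaces the quadratic nested scan of all offset pairs per string by a single pass keeping a dict of doublet -> first index and testing gap >= 2, with early exit on the first match
import Mathlib
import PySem

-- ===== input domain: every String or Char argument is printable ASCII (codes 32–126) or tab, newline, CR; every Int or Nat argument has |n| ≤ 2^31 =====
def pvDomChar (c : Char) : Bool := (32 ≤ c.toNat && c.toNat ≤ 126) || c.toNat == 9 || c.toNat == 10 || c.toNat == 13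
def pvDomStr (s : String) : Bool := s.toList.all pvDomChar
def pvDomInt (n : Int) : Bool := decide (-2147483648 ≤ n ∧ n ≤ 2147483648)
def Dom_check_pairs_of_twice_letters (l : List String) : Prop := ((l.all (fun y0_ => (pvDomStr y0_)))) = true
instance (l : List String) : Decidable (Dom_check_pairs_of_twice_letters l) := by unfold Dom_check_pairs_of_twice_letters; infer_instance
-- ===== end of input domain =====

-- B replaces A's per-string quadratic scan of all offset pairs by a single pass over the
-- doublets keeping a dict of doublet -> first index (gap >= 2 test), with early exit.

-- ===== PORT A =====
def check_pairs_of_twice_letters (l : List String) : List String :=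
  l.foldl (fun result s =>
    let ok := (PySem.List.pyRange 0 (PySem.Str.len s - 1) 1).foldl (fun ok i =>
      let doublet := PySem.Str.slice s (some i) (some (i + 2))
      (PySem.List.pyRange (i + 2) (PySem.Str.len s - 1) 1).foldl (fun ok j =>
        if doublet == PySem.Str.slice s (some j) (some (j + 2)) then true else ok) ok) false
    if ok then result ++ [s] else result) []

-- ===== PORT B =====
-- the 'for i in range(len(s)-1): … break' loop of Source B, as recursion over the index list
def pvGoB (s : String) : List Int → PySem.Dict String Int → Bool
  | [], _ => false
  | i :: rest, first =>
    let p := PySem.Str.slice s (some i) (some (i + 2))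
    match first.get? p with
    | some v => if v ≤ i - 2 then true else pvGoB s rest first
    | none => pvGoB s rest (first.insert p i)

def check_pairs_of_twice_letters_alt (l : List String) : List String :=
  l.foldl (fun result s =>
    if pvGoB s (PySem.List.pyRange 0 (PySem.Str.len s - 1) 1) PySem.Dict.empty
    then result ++ [s] else result) []

-- ===== PRECONDITION & SPEC =====
def Spec_check_pairs_of_twice_letters (l : List String) (out : List String) : Prop := out = check_pairs_of_twice_letters_alt l
instance (l : List String) (out : List String) : Decidable (Spec_check_pairs_of_twice_letters l out) := by unfold Spec_check_pairs_of_twice_letters; infer_instance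

-- ===== CLAIM (what is proved, stated in full; the proofs are below) =====
def Claim_equal_check_pairs_of_twice_letters : Prop := ∀ (l : List String), Dom_check_pairs_of_twice_letters l → Spec_check_pairs_of_twice_letters l (check_pairs_of_twice_letters l)

-- ===== LEMMAS AND PROOFS =====

-- the doublet at index i
def pvPr (s : String) (i : Int) : String := PySem.Str.slice s (some i) (some (i + 2))

-- the dict invariant: first.get? p is the first index < k whose doublet is p (none if there is none)
def pvInv (s : String) (k : Int) (d : PySem.Dict String Int) : Prop :=
  ∀ p : String,
    (∀ v : Int, d.get? p = some v ↔
      (0 ≤ v ∧ v < k ∧ pvPr s v = p ∧ ∀ u : Int, 0 ≤ u → u < v → pvPr s u ≠ p)) ∧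
    (d.get? p = none ↔ ∀ u : Int, 0 ≤ u → u < k → pvPr s u ≠ p)

theorem pvASideGen (q : Int → Int → Bool) (inner : Int → List Int) :
    ∀ (is : List Int) (b : Bool),
      is.foldl (fun ok i => (inner i).foldl (fun ok j => if q i j then true else ok) ok) b
      = (b || is.any (fun i => (inner i).any (q i))) := by
  intro is
  induction is with
  | nil => simp
  | cons i rest ih =>
    intro b
    simp only [List.foldl_cons, List.any_cons]
    rw [PySem.List.foldl_if_true_eq, ih, Bool.or_assoc]

theorem pvASide (s : String) :
    (PySem.List.pyRange 0 (PySem.Str.len s - 1) 1).foldl (fun ok i =>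
      (PySem.List.pyRange (i + 2) (PySem.Str.len s - 1) 1).foldl (fun ok j =>
        if pvPr s i == pvPr s j then true else ok) ok) false
    = (PySem.List.pyRange 0 (PySem.Str.len s - 1) 1).any (fun i =>
        (PySem.List.pyRange (i + 2) (PySem.Str.len s - 1) 1).any (fun j => pvPr s i == pvPr s j)) := by
  rw [pvASideGen (fun i j => pvPr s i == pvPr s j)
      (fun i => PySem.List.pyRange (i + 2) (PySem.Str.len s - 1) 1), Bool.false_or]

theorem pvInvStepMem (s : String) (k : Int) (d : PySem.Dict String Int) (v : Int)
    (hInv : pvInv s k d) (hg : d.get? (pvPr s k) = some v) : pvInv s (k + 1) d := by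
  intro p
  obtain ⟨h1, h2⟩ := hInv p
  refine ⟨fun v' => ⟨fun hv' => ?_, fun hc => ?_⟩, ⟨fun hn => ?_, fun hall => ?_⟩⟩
  · obtain ⟨a, b, c, dm⟩ := (h1 v').mp hv'
    exact ⟨a, by omega, c, dm⟩
  · obtain ⟨a, b, c, dm⟩ := hc
    by_cases hb : v' < k
    · exact (h1 v').mpr ⟨a, hb, c, dm⟩
    · have hv'k : v' = k := by omega
      subst hv'k
      rw [c] at hg
      obtain ⟨a2, b2, c2, dm2⟩ := (h1 v).mp hg
      exact absurd c2 (dm v a2 b2)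
  · intro u hu0 huk1
    by_cases huk : u < k
    · exact h2.mp hn u hu0 huk
    · have : u = k := by omega
      subst this
      intro hp
      rw [← hp] at hn
      rw [hn] at hg
      cases hg
  · exact h2.mpr (fun u a b => hall u a (by omega))

theorem pvInvStepNew (s : String) (k : Int) (d : PySem.Dict String Int)
    (hk : 0 ≤ k) (hInv : pvInv s k d) (hg : d.get? (pvPr s k) = none) :
    pvInv s (k + 1) (d.insert (pvPr s k) k) := by
  have hno : ∀ u : Int, 0 ≤ u → u < k → pvPr s u ≠ pvPr s k := (hInv (pvPr s k)).2.mp hg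
  intro p
  obtain ⟨h1, h2⟩ := hInv p
  have get' : (d.insert (pvPr s k) k).get? p = if p = pvPr s k then some k else d.get? p := by
    rw [PySem.Dict.get?_insert]
  refine ⟨fun v' => ?_, ?_⟩
  · rw [get']
    split_ifs with hp
    · subst hp
      constructor
      · intro h
        obtain rfl : k = v' := by injection h
        exact ⟨hk, by omega, rfl, hno⟩
      · rintro ⟨a, b, c, dm⟩
        by_cases hb : v' < k
        · exact absurd c (hno v' a hb)
        · have : v' = k := by omega
          rw [this]
    · rw [h1 v']
      constructor
      · rintro ⟨a, b, c, dm⟩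
        exact ⟨a, by omega, c, dm⟩
      · rintro ⟨a, b, c, dm⟩
        by_cases hb : v' < k
        · exact ⟨a, hb, c, dm⟩
        · have : v' = k := by omega
          rw [this] at c
          exact absurd c.symm hp
  · rw [get']
    split_ifs with hp
    · constructor
      · intro h
        cases h
      · intro hall
        exact absurd hp.symm (hall k hk (by omega))
    · rw [h2]
      constructor
      · intro hall u hu0 hu
        by_cases huk : u < k
        · exact hall u hu0 huk
        · have : u = k := by omega
          rw [this]
          exact fun hc => hp hc.symm
      · intro hall u hu0 hu
        exact hall u hu0 (by omega)

theorem pvShift (s : String) (k N : Int)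
    (hno : ¬ ∃ j : Int, 0 ≤ j ∧ j ≤ k - 2 ∧ pvPr s j = pvPr s k) :
    (∃ i : Int, k ≤ i ∧ i < N ∧ ∃ j : Int, 0 ≤ j ∧ j ≤ i - 2 ∧ pvPr s j = pvPr s i) ↔
    (∃ i : Int, k + 1 ≤ i ∧ i < N ∧ ∃ j : Int, 0 ≤ j ∧ j ≤ i - 2 ∧ pvPr s j = pvPr s i) := by
  constructor
  · rintro ⟨i, h1, h2, j, hj⟩
    by_cases hik : i = k
    · subst hik
      exact absurd ⟨j, hj⟩ hno
    · exact ⟨i, by omega, h2, j, hj⟩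
  · rintro ⟨i, h1, h2, hj⟩
    exact ⟨i, by omega, h2, hj⟩

theorem pvGoBSpec (s : String) (N : Int) :
    ∀ (m : Nat) (k : Int) (d : PySem.Dict String Int), (N - k).toNat = m → 0 ≤ k → pvInv s k d →
      (pvGoB s (PySem.List.pyRange k N 1) d = true ↔
        ∃ i : Int, k ≤ i ∧ i < N ∧ ∃ j : Int, 0 ≤ j ∧ j ≤ i - 2 ∧ pvPr s j = pvPr s i) := by
  intro m
  induction m with
  | zero =>
    intro k d hm hk hInv
    rw [PySem.List.pyRange_one_eq_nil (by omega)]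
    refine iff_of_false (by simp [pvGoB]) ?_
    rintro ⟨i, h1, h2, -⟩
    omega
  | succ m ih =>
    intro k d hm hk hInv
    have hkN : k < N := by omega
    rw [PySem.List.pyRange_one_cons hkN]
    show (match d.get? (pvPr s k) with
      | some v => if v ≤ k - 2 then true else pvGoB s (PySem.List.pyRange (k + 1) N 1) d
      | none => pvGoB s (PySem.List.pyRange (k + 1) N 1) (d.insert (pvPr s k) k)) = true ↔ _
    cases hg : d.get? (pvPr s k) with
    | some v =>
      obtain ⟨hv0, hvk, hvp, hvmin⟩ := (hInv (pvPr s k)).1 v |>.mp hg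
      by_cases hv : v ≤ k - 2
      · simp only [hv, if_true]
        exact ⟨fun _ => ⟨k, le_refl k, hkN, v, hv0, hv, hvp⟩, fun _ => by trivial⟩
      · simp only [hv, if_false]
        rw [ih (k + 1) d (by omega) (by omega) (pvInvStepMem s k d v hInv hg)]
        rw [← pvShift s k N]
        rintro ⟨j, hj0, hj2, hjp⟩
        rcases lt_or_ge j v with h | h
        · exact hvmin j hj0 h hjp
        · omega
    | none =>
      rw [ih (k + 1) (d.insert (pvPr s k) k) (by omega) (by omega) (pvInvStepNew s k d hk hInv hg)]
      rw [← pvShift s k N]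
      rintro ⟨j, hj0, hj2, hjp⟩
      exact (hInv (pvPr s k)).2.mp hg j hj0 (by omega) hjp

theorem pvInvEmpty (s : String) : pvInv s 0 (PySem.Dict.empty : PySem.Dict String Int) := by
  intro p
  constructor
  · intro v
    rw [PySem.Dict.get?_empty]
    constructor
    · intro h; cases h
    · rintro ⟨a, b, -⟩; omega
  · rw [PySem.Dict.get?_empty]
    constructor
    · intro _ u hu0 hu; omega
    · intro _; rfl

theorem pvKey (s : String) :
    (PySem.List.pyRange 0 (PySem.Str.len s - 1) 1).foldl (fun ok i =>
      let doublet := PySem.Str.slice s (some i) (some (i + 2))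
      (PySem.List.pyRange (i + 2) (PySem.Str.len s - 1) 1).foldl (fun ok j =>
        if doublet == PySem.Str.slice s (some j) (some (j + 2)) then true else ok) ok) false
    = pvGoB s (PySem.List.pyRange 0 (PySem.Str.len s - 1) 1) PySem.Dict.empty := by
  have hA : (PySem.List.pyRange 0 (PySem.Str.len s - 1) 1).foldl (fun ok i =>
      let doublet := PySem.Str.slice s (some i) (some (i + 2))
      (PySem.List.pyRange (i + 2) (PySem.Str.len s - 1) 1).foldl (fun ok j =>
        if doublet == PySem.Str.slice s (some j) (some (j + 2)) then true else ok) ok) false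
      = (PySem.List.pyRange 0 (PySem.Str.len s - 1) 1).foldl (fun ok i =>
        (PySem.List.pyRange (i + 2) (PySem.Str.len s - 1) 1).foldl (fun ok j =>
          if pvPr s i == pvPr s j then true else ok) ok) false := rfl
  rw [hA, pvASide]
  rw [Bool.eq_iff_iff]
  rw [pvGoBSpec s (PySem.Str.len s - 1) (PySem.Str.len s - 1 - 0).toNat 0 PySem.Dict.empty rfl
    (le_refl 0) (pvInvEmpty s)]
  simp only [List.any_eq_true, PySem.List.mem_pyRange_one, beq_iff_eq]
  constructor
  · rintro ⟨i, ⟨hi0, hiN⟩, j, ⟨hj1, hj2⟩, hp⟩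
    exact ⟨j, by omega, hj2, i, hi0, by omega, hp⟩
  · rintro ⟨i, hi0, hiN, j, hj0, hj2, hp⟩
    exact ⟨j, ⟨hj0, by omega⟩, i, ⟨by omega, hiN⟩, hp⟩

-- ===== VERDICT (by name: the statement is the Claim_ definition above) =====
theorem check_pairs_of_twice_letters_spec : Claim_equal_check_pairs_of_twice_letters := by
  intro l _
  unfold Spec_check_pairs_of_twice_letters check_pairs_of_twice_letters check_pairs_of_twice_letters_alt
  have hfun : (fun (result : List String) (s : String) =>
      let ok := (PySem.List.pyRange 0 (PySem.Str.len s - 1) 1).foldl (fun ok i =>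
        let doublet := PySem.Str.slice s (some i) (some (i + 2))
        (PySem.List.pyRange (i + 2) (PySem.Str.len s - 1) 1).foldl (fun ok j =>
          if doublet == PySem.Str.slice s (some j) (some (j + 2)) then true else ok) ok) false
      if ok then result ++ [s] else result)
      = (fun (result : List String) (s : String) =>
        if pvGoB s (PySem.List.pyRange 0 (PySem.Str.len s - 1) 1) PySem.Dict.empty
        then result ++ [s] else result) := by
    funext result s
    simp only [pvKey s]
  rw [hfun]
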